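-- pv_equiv track=rewrite | github.com/Jeongyun-Jang/coding-test | programmers/queue_Q42586.py | solution
-- ===== SOURCE A (Python) =====
-- from collections import deque
--
-- def solution(progresses, speeds):
--     days_remaining = deque()
--     days = 0
--     remaining_work = 0
--     count = 0
--
--     for i in range(len(progresses)):
--         remaining_work = 100 - progresses[i]
--         if remaining_work % speeds[i] == 0:
--             days = remaining_work // speeds[i]
--         else:
--             days = (remaining_work // speeds[i]) + 1
--         days_remaining.append(days)
--
--     answer = []
--
--     while days_remaining:
--         current = days_remaining.popleft()
--         count = 1
--
--         while days_remaining and days_remaining[0] <= current: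
--             days_remaining.popleft()
--             count += 1
--         answer.append(count)
--
--
--     return answer
-- ===== SOURCE B (Python) =====
-- def solution(progresses, speeds):
--     days = [-((p - 100) // s) for p, s in zip(progresses, speeds)]
--     answer = []
--     leader = 0
--     count = 0
--     for d in days:
--         if count and d <= leader:
--             count += 1
--         else:
--             if count:
--                 answer.append(count)
--             leader = d
--             count = 1
--     if count:
--         answer.append(count)
--     return answer
-- ===== Notes on version B (the rewrite author's own statement) =====
-- stated objective: simpler
-- what changed: Replaces A's deque with nested popleft loops by computing the days list with a single ceiling-division formula -((p-100)//s) over zip and then one flat pass keeping a leader/count accumulator that flushes a group when a day exceeds the leader.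
import Mathlib
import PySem

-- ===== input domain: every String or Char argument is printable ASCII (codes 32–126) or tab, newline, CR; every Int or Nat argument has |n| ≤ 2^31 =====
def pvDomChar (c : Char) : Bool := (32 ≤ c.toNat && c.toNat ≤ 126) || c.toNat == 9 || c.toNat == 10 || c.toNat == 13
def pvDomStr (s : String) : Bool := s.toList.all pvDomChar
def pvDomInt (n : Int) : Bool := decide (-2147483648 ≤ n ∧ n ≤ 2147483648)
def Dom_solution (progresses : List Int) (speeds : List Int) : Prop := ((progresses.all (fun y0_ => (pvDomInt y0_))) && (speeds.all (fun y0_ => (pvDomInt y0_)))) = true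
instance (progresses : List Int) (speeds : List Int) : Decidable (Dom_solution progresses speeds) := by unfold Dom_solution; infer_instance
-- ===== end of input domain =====

-- B replaces A's deque with nested pops by a days list from a ceiling-division
-- formula plus one flat leader/count pass (objective: simpler; return value only, no mutation).

-- ===== PORT A =====
-- for i in range(len(progresses)): days_remaining.append(...)
def pvDaysA (progresses : List Int) (speeds : List Int) : List Int :=
  (PySem.List.pyRange 0 (PySem.List.len progresses) 1).foldl (fun acc i =>
    let remaining_work := 100 - PySem.List.pyGetD progresses i 0
    let s := PySem.List.pyGetD speeds i 0
    acc ++ [if PySem.Int.mod remaining_work s = 0 then PySem.Int.floordiv remaining_work s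
            else PySem.Int.floordiv remaining_work s + 1]) []

-- inner 'while days_remaining and days_remaining[0] <= current' loop: returns (count, rest of deque)
def pvInnerA (current : Int) : List Int → Int → Int × List Int
  | [], count => (count, [])
  | d :: rest, count => if d ≤ current then pvInnerA current rest (count + 1) else (count, d :: rest)

theorem pvInnerA_length (current : Int) : ∀ (ds : List Int) (c : Int),
    (pvInnerA current ds c).2.length ≤ ds.length := by
  intro ds
  induction ds with
  | nil => intro c; simp [pvInnerA]
  | cons d rest ih =>
      intro c
      simp only [pvInnerA]
      split
      · exact le_trans (ih (c + 1)) (Nat.le_succ _)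
      · simp

-- outer 'while days_remaining' loop
def pvDrainA : List Int → List Int
  | [] => []
  | current :: rest =>
      let r := pvInnerA current rest 1
      r.1 :: pvDrainA r.2
termination_by ds => ds.length
decreasing_by
  simpa using Nat.lt_succ_of_le (pvInnerA_length current rest 1)

def solution (progresses : List Int) (speeds : List Int) : List Int :=
  pvDrainA (pvDaysA progresses speeds)

-- ===== PORT B =====
-- days = [-((p - 100) // s) for p, s in zip(progresses, speeds)]
def pvDaysB (progresses : List Int) (speeds : List Int) : List Int :=
  (progresses.zip speeds).map (fun ps => -(PySem.Int.floordiv (ps.1 - 100) ps.2))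

-- the flat 'for d in days' pass with (answer, leader, count) state
def pvGoB : List Int → List Int → Int → Int → List Int
  | [], answer, _, count => if count ≠ 0 then answer ++ [count] else answer
  | d :: rest, answer, leader, count =>
      if count ≠ 0 ∧ d ≤ leader then pvGoB rest answer leader (count + 1)
      else pvGoB rest (if count ≠ 0 then answer ++ [count] else answer) d 1

def solution_alt (progresses : List Int) (speeds : List Int) : List Int :=
  pvGoB (pvDaysB progresses speeds) [] 0 0

-- ===== PRECONDITION & SPEC =====
-- Pre_ excludes exactly the inputs where A raises: speeds shorter than progresses
-- (IndexError) or a zero speed at an index the loop reaches (ZeroDivisionError).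
def Pre_solution (progresses : List Int) (speeds : List Int) : Prop :=
  progresses.length ≤ speeds.length ∧ ∀ s ∈ speeds.take progresses.length, s ≠ 0
instance (progresses : List Int) (speeds : List Int) : Decidable (Pre_solution progresses speeds) := by
  unfold Pre_solution; infer_instance

def pvWitness_solution : List Int × List Int := ([93, 30, 55], [1, 30, 5])

def Spec_solution (progresses : List Int) (speeds : List Int) (out : List Int) : Prop :=
  out = solution_alt progresses speeds
instance (progresses : List Int) (speeds : List Int) (out : List Int) : Decidable (Spec_solution progresses speeds out) := by
  unfold Spec_solution; infer_instance

-- ===== CLAIM (what is proved, stated in full; the proofs are below) =====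
def Claim_equal_solution : Prop := ∀ (progresses : List Int) (speeds : List Int), Dom_solution progresses speeds → Pre_solution progresses speeds → Spec_solution progresses speeds (solution progresses speeds)

-- ===== LEMMAS AND PROOFS =====

-- A's divisibility-split quotient is the ceiling -((-a) // s), for every nonzero s
theorem pv_ceil_eq (a s : Int) (hs : s ≠ 0) :
    (if PySem.Int.mod a s = 0 then PySem.Int.floordiv a s else PySem.Int.floordiv a s + 1)
      = -(PySem.Int.floordiv (-a) s) := by
  have h : PySem.Int.floordiv (-a) s = -(PySem.Int.floordiv a s) - if s = 0 ∨ s ∣ a then 0 else 1 :=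
    Int.neg_fdiv
  rw [h]
  rcases em (s ∣ a) with hd | hd
  · rw [if_pos ((PySem.Int.mod_eq_zero_iff_dvd a s).mpr hd), if_pos (Or.inr hd)]; ring
  · rw [if_neg (fun h0 => hd ((PySem.Int.mod_eq_zero_iff_dvd a s).mp h0)),
        if_neg (by tauto)]
    ring

theorem pv_days_eq (progresses speeds : List Int)
    (hlen : progresses.length ≤ speeds.length)
    (hnz : ∀ s ∈ speeds.take progresses.length, s ≠ 0) :
    pvDaysA progresses speeds = pvDaysB progresses speeds := by
  unfold pvDaysA pvDaysB
  rw [PySem.List.foldl_append_singleton_eq_map, List.nil_append,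
      PySem.List.len_eq, PySem.List.pyRange_one]
  rw [List.map_map]
  apply List.ext_getElem
  · simp [hlen]
  · intro k h1 h2
    have hk : k < progresses.length := by simpa using h1
    have hks : k < speeds.length := lt_of_lt_of_le hk hlen
    have hz : speeds[k] ≠ 0 := by
      have hkt : k < (speeds.take progresses.length).length := by simp; omega
      have hmem := hnz ((speeds.take progresses.length)[k]'hkt) (List.getElem_mem hkt)
      simpa [List.getElem_take] using hmem
    simp only [List.getElem_map, List.getElem_range, List.getElem_zip, Function.comp]
    rw [show ((0 : Int) + (k : Int)) = ((k : Nat) : Int) by simp]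
    simp only [PySem.List.pyGetD_natCast, List.getD_eq_getElem?_getD,
      List.getElem?_eq_getElem hk, List.getElem?_eq_getElem hks, Option.getD_some]
    have := pv_ceil_eq (100 - progresses[k]) speeds[k] hz
    rw [this]
    congr 1
    ring_nf

theorem pvGoB_eq (ds : List Int) : ∀ (answer : List Int) (leader count : Int), 0 < count →
    pvGoB ds answer leader count
      = answer ++ (pvInnerA leader ds count).1 :: pvDrainA (pvInnerA leader ds count).2 := by
  induction ds with
  | nil =>
      intro answer leader count hc
      simp [pvGoB, pvInnerA, pvDrainA, hc.ne']
  | cons d rest ih =>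
      intro answer leader count hc
      by_cases hle : d ≤ leader
      · rw [show pvGoB (d :: rest) answer leader count = pvGoB rest answer leader (count + 1) by
              simp [pvGoB, hc.ne', hle],
            show pvInnerA leader (d :: rest) count = pvInnerA leader rest (count + 1) by
              simp [pvInnerA, hle]]
        exact ih answer leader (count + 1) (by omega)
      · rw [show pvGoB (d :: rest) answer leader count = pvGoB rest (answer ++ [count]) d 1 by
              simp [pvGoB, hc.ne', hle],
            show pvInnerA leader (d :: rest) count = (count, d :: rest) by
              simp [pvInnerA, hle]]
        rw [ih (answer ++ [count]) d 1 (by omega)]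
        rw [show pvDrainA (d :: rest) = (pvInnerA d rest 1).1 :: pvDrainA (pvInnerA d rest 1).2
              by rw [pvDrainA]]
        simp

theorem pv_group_eq (ds : List Int) : pvGoB ds [] 0 0 = pvDrainA ds := by
  cases ds with
  | nil => simp [pvGoB, pvDrainA]
  | cons d rest =>
      rw [show pvGoB (d :: rest) [] 0 0 = pvGoB rest [] d 1 by simp [pvGoB]]
      rw [pvGoB_eq rest [] d 1 (by omega)]
      rw [show pvDrainA (d :: rest) = (pvInnerA d rest 1).1 :: pvDrainA (pvInnerA d rest 1).2
            by rw [pvDrainA]]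
      simp

-- ===== VERDICT (by name: the statement is the Claim_ definition above) =====
theorem solution_spec : Claim_equal_solution := by
  intro progresses speeds _ hpre
  unfold Spec_solution solution solution_alt
  rw [pv_days_eq progresses speeds hpre.1 hpre.2, pv_group_eq]
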